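-- pv_equiv track=rewrite | github.com/JoaoMarcelino/University | Python IPRP/2ºTeste Prep.py | nifvalidos
-- ===== SOURCE A (Python) =====
-- def nifvalidos(nifs):
--     new_dicio={}
--     for key,value in nifs.items():
--         soma=0
--         for i in range(len(str(key))):
--             strkey=str(key)
--             soma+= int(strkey[i]) * (len(strkey)-i)
--         if soma%11 ==0:
--             new_dicio[key]=value
--     return new_dicio
-- ===== SOURCE B (Python) =====
-- def nifvalidos(nifs):
--     # single pass over str(key): running prefix-sum acc; sum of prefix sums
--     # equals the digit-weighted sum sum(d_i * (n - i)).
--     def soma(s):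
--         acc = tot = 0
--         for ch in s:
--             acc += int(ch)
--             tot += acc
--         return tot
--     return {k: v for k, v in nifs.items() if soma(str(k)) % 11 == 0}
-- ===== Notes on version B (the rewrite author's own statement) =====
-- stated objective: faster
-- what changed: Replaces the index loop (which recomputes str(key) and indexes it on every iteration, multiplying int(strkey[i]) by (len-i)) with a single direct pass over str(key) keeping a running prefix sum whose accumulated total equals the weighted sum (sum of prefix sums = sum d_i*(n-i)), and builds the result with a dict comprehension instead of inserting into a mutated dict.
import Mathlib
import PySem

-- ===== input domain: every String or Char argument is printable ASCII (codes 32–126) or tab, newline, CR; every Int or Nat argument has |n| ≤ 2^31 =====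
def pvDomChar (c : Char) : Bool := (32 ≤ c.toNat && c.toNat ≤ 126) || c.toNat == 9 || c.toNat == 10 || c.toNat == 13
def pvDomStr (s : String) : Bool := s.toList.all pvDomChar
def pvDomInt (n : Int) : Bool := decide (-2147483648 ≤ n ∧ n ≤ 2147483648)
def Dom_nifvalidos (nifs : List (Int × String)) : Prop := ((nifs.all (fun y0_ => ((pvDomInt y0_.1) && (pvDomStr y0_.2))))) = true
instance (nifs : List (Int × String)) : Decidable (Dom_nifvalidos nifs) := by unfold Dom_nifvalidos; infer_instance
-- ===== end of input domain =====

-- B computes the digit-weighted sum by a running prefix-sum pass instead of A's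
-- indexed multiply loop, and filters with a dict comprehension (same cost).

-- ===== PORT A =====
def nifvalidos (nifs : List (Int × String)) : List (Int × String) :=
  (nifs.foldl
    (fun (d : PySem.Dict Int String) kv =>
      let soma :=
        (PySem.List.pyRange 0 ((PySem.Int.toChars kv.1).length : Int) 1).foldl
          (fun soma i =>
            let strkey := PySem.Int.toChars kv.1
            -- int(strkey[i]): .getD 0 is never taken inside Pre_ (all-digit key)
            soma + (PySem.Int.ofChars? [PySem.List.pyGetD strkey i '0']).getD 0
                     * ((strkey.length : Int) - i))
          0
      if PySem.Int.mod soma 11 = 0 then d.insert kv.1 kv.2 else d)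
    PySem.Dict.empty).items

-- ===== PORT B =====
-- int(ch) for a single character; .getD 0 never taken inside Pre_
def pvDigit (c : Char) : Int := (PySem.Int.ofChars? [c]).getD 0

def pvSoma (cs : List Char) : Int :=
  (cs.foldl (fun (p : Int × Int) c => (p.1 + pvDigit c, p.2 + (p.1 + pvDigit c)))
    ((0 : Int), (0 : Int))).2

def nifvalidos_alt (nifs : List (Int × String)) : List (Int × String) :=
  nifs.filter (fun kv => PySem.Int.mod (pvSoma (PySem.Int.toChars kv.1)) 11 == 0)

-- ===== PRECONDITION & SPEC =====
-- Pre_ requires distinct keys (the argument encodes a Python dict, which cannot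
-- hold a repeated key) and nonnegative keys (str of a negative key starts with
-- '-', so int('-') raises ValueError in A, and in B alike).
def Pre_nifvalidos (nifs : List (Int × String)) : Prop :=
  (nifs.map Prod.fst).Nodup ∧ ∀ kv ∈ nifs, 0 ≤ kv.1
instance (nifs : List (Int × String)) : Decidable (Pre_nifvalidos nifs) := by
  unfold Pre_nifvalidos; infer_instance
def pvWitness_nifvalidos : (List (Int × String)) := [(209, "ana"), (7, "bo")]

def Spec_nifvalidos (nifs : List (Int × String)) (out : List (Int × String)) : Prop := out = nifvalidos_alt nifs
instance (nifs : List (Int × String)) (out : List (Int × String)) : Decidable (Spec_nifvalidos nifs out) := by unfold Spec_nifvalidos; infer_instance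

-- ===== CLAIM (what is proved, stated in full; the proofs are below) =====
def Claim_equal_nifvalidos : Prop := ∀ (nifs : List (Int × String)), Dom_nifvalidos nifs → Pre_nifvalidos nifs → Spec_nifvalidos nifs (nifvalidos nifs)

-- ===== LEMMAS AND PROOFS =====

-- the digit-weighted sum Σ d_i * (n - i), structurally
def pvW : List Char → Int
  | [] => 0
  | c :: r => pvDigit c * ((r.length : Int) + 1) + pvW r

theorem pvSoma_fold (cs : List Char) (a t : Int) :
    cs.foldl (fun (p : Int × Int) c => (p.1 + pvDigit c, p.2 + (p.1 + pvDigit c))) (a, t)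
      = (a + (cs.map pvDigit).sum, t + (cs.length : Int) * a + pvW cs) := by
  induction cs generalizing a t with
  | nil => simp [pvW]
  | cons c r ih =>
    simp only [List.foldl_cons, ih, pvW, List.map_cons, List.sum_cons, List.length_cons]
    refine Prod.ext ?_ ?_ <;> simp <;> ring

theorem pvSoma_eq (cs : List Char) : pvSoma cs = pvW cs := by
  simp [pvSoma, pvSoma_fold]

theorem sum_range_eq_pvW (cs : List Char) :
    ((List.range cs.length).map
        (fun k => pvDigit (cs.getD k '0') * ((cs.length : Int) - (k : Int)))).sum
      = pvW cs := by
  induction cs with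
  | nil => simp [pvW]
  | cons c r ih =>
    rw [List.length_cons, List.range_succ_eq_map, List.map_cons, List.sum_cons,
        List.map_map]
    have h2 : ((List.range r.length).map
        (((fun k => pvDigit ((c :: r).getD k '0') * (((r.length + 1 : Nat) : Int) - (k : Int))) ∘ Nat.succ))).sum
        = ((List.range r.length).map
            (fun k => pvDigit (r.getD k '0') * ((r.length : Int) - (k : Int)))).sum := by
      apply congrArg
      apply List.map_congr_left
      intro k _
      simp only [Function.comp, Nat.succ_eq_add_one, List.getD_cons_succ]
      push_cast; ring_nf
    rw [h2, ih, pvW]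
    simp only [List.getD_cons_zero]
    push_cast; ring

theorem A_soma_eq (cs : List Char) :
    (PySem.List.pyRange 0 (cs.length : Int) 1).foldl
        (fun soma i =>
          soma + (PySem.Int.ofChars? [PySem.List.pyGetD cs i '0']).getD 0
                   * ((cs.length : Int) - i)) 0
      = pvSoma cs := by
  rw [PySem.List.foldl_add, PySem.List.pyRange_one, List.map_map, pvSoma_eq]
  have : ((cs.length : Int) - 0).toNat = cs.length := by omega
  rw [this, ← sum_range_eq_pvW cs]
  simp only [zero_add]
  apply congrArg
  apply List.map_congr_left
  intro k _
  simp [Function.comp, pvDigit, PySem.List.pyGetD_natCast]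

-- the filtered-insert loop over fresh distinct keys produces exactly the filter
theorem loop_items (p : Int × String → Prop) [DecidablePred p]
    (l : List (Int × String)) :
    ∀ (d : PySem.Dict Int String), (l.map Prod.fst).Nodup →
      (∀ kv ∈ l, d.contains kv.1 = false) →
      (l.foldl (fun d kv => if p kv then d.insert kv.1 kv.2 else d) d).items
        = d.items ++ l.filter (fun kv => decide (p kv)) := by
  induction l with
  | nil => intro d _ _; simp
  | cons kv rest ih =>
    intro d hnd hfresh
    have hkv : d.contains kv.1 = false := hfresh kv (by simp)
    have hndr : (rest.map Prod.fst).Nodup := (List.nodup_cons.mp hnd).2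
    have hhead : ∀ kv' ∈ rest, kv'.1 ≠ kv.1 := by
      intro kv' h
      have := (List.nodup_cons.mp hnd).1
      intro he; exact this (he ▸ List.mem_map_of_mem h)
    by_cases hp : p kv
    · simp only [List.foldl_cons, if_pos hp]
      rw [ih (d.insert kv.1 kv.2) hndr ?_]
      · rw [PySem.Dict.items_insert_of_not_contains _ _ hkv]
        simp [hp]
      · intro kv' h
        rw [PySem.Dict.contains_insert]
        have h1 : (kv'.1 == kv.1) = false := by
          simp [hhead kv' h]
        rw [h1, hfresh kv' (by simp [h])]
        rfl
    · simp only [List.foldl_cons, if_neg hp]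
      rw [ih d hndr (fun kv' h => hfresh kv' (by simp [h]))]
      simp [hp]

-- ===== VERDICT (by name: the statement is the Claim_ definition above) =====
theorem nifvalidos_spec : Claim_equal_nifvalidos := by
  intro nifs _ hpre
  unfold Spec_nifvalidos nifvalidos nifvalidos_alt
  rw [loop_items (fun kv => PySem.Int.mod
        ((PySem.List.pyRange 0 ((PySem.Int.toChars kv.1).length : Int) 1).foldl
          (fun soma i =>
            soma + (PySem.Int.ofChars? [PySem.List.pyGetD (PySem.Int.toChars kv.1) i '0']).getD 0
                     * (((PySem.Int.toChars kv.1).length : Int) - i)) 0) 11 = 0)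
      nifs PySem.Dict.empty hpre.1 (by simp)]
  rw [PySem.Dict.items]
  simp only [PySem.Dict.empty, List.nil_append]
  apply List.filter_congr
  intro kv _
  rw [A_soma_eq (PySem.Int.toChars kv.1)]
  rfl
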